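-- pv_equiv track=rewrite | github.com/adrevezzo/pga-data | player_results.py | name_clean
-- ===== SOURCE A (Python) =====
-- def name_clean(name_string):
--     name_as_list = [*name_string]
--     name = ''
--     for i,char in enumerate(name_as_list[::-1]):
--         if i == 0 and char == "." or char == ",":
--             continue
--         else:
--             if char == ' ':
--                 name += "-"
--             else:
--                 name += char
--     return name[::-1]
-- ===== SOURCE B (Python) =====
-- def name_clean(name_string):
--     s = name_string[:-1] if name_string.endswith('.') else name_string
--     return ''.join('-' if c == ' ' else c for c in s if c != ',')
-- ===== Notes on version B (the rewrite author's own statement) =====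
-- stated objective: idiomatic
-- what changed: Replaces the reversed enumerate loop with index tracking and a final reversal by a single forward comprehension after stripping one trailing dot detected with endswith.
import Mathlib
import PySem

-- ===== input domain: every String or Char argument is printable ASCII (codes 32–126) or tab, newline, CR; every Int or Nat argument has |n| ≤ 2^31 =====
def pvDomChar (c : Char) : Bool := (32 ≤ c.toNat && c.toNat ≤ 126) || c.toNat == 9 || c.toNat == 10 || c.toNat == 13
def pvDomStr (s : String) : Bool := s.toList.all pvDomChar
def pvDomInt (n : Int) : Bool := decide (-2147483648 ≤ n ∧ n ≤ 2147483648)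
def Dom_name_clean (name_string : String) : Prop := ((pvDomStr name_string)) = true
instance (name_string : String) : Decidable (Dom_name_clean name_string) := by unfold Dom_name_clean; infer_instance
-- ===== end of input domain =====

-- B strips one trailing dot detected with endswith, then does one forward filter/map pass (drop ',', ' '→'-'), instead of A's reversed enumerate loop with index tracking and a final reversal. Same O(n) cost.


-- ===== PORT A =====
def name_clean (name_string : String) : String :=
  let name_as_list := name_string.toList
  let name := (PySem.List.enumerate name_as_list.reverse 0).foldl
    (fun name ic =>
      if (ic.1 == 0 && ic.2 == '.') || ic.2 == ',' then name
      else if ic.2 == ' ' then name ++ ['-'] else name ++ [ic.2])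
    ([] : List Char)
  String.mk name.reverse

-- ===== PORT B =====
def name_clean_alt (name_string : String) : String :=
  let s := if PySem.Str.endswith name_string "." then PySem.Str.slice name_string none (some (-1)) else name_string
  String.mk ((s.toList.filter (fun c => !(c == ','))).map (fun c => if c == ' ' then '-' else c))

-- ===== PRECONDITION & SPEC =====
def Spec_name_clean (name_string : String) (out : String) : Prop := out = name_clean_alt name_string
instance (name_string : String) (out : String) : Decidable (Spec_name_clean name_string out) := by unfold Spec_name_clean; infer_instance

-- ===== CLAIM (what is proved, stated in full; the proofs are below) =====
def Claim_equal_name_clean : Prop := ∀ (name_string : String), Dom_name_clean name_string → Spec_name_clean name_string (name_clean name_string)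

-- ===== LEMMAS AND PROOFS =====

-- B's filter-then-map pass as one filterMap
theorem filter_map_eq_filterMap (l : List Char) :
    (l.filter (fun c => !(c == ','))).map (fun c => if c == ' ' then '-' else c)
    = l.filterMap (fun c => if c == ',' then none else some (if c == ' ' then '-' else c)) := by
  induction l with
  | nil => rfl
  | cons c cs ih =>
    by_cases hc : c = ','
    · simp [hc]
      simpa using ih
    · simp [hc]
      simpa using ih

-- the tail of A's loop (all indices ≥ 1) is the same filterMap, appended
theorem foldA_tail (l : List Char) (s : Int) (acc : List Char) (hs : 1 ≤ s) :
    (PySem.List.enumerate l s).foldl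
      (fun name ic =>
        if (ic.1 == 0 && ic.2 == '.') || ic.2 == ',' then name
        else if ic.2 == ' ' then name ++ ['-'] else name ++ [ic.2]) acc
    = acc ++ l.filterMap (fun c => if c == ',' then none else some (if c == ' ' then '-' else c)) := by
  induction l generalizing s acc with
  | nil => simp [PySem.List.enumerate_nil]
  | cons c cs ih =>
    have hs0 : (s == 0) = false := by simp; omega
    rw [PySem.List.enumerate_cons]
    simp only [List.foldl_cons, List.filterMap_cons, hs0, Bool.false_and, Bool.false_or]
    rw [ih _ _ (by omega)]
    by_cases hc : c = ','
    · simp [hc]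
    · have hc' : (c == ',') = false := by simp [hc]
      simp only [hc']
      by_cases hsp : c = ' ' <;> simp [hsp]

theorem singleton_suffix_concat (l : List Char) (r : Char) : ['.'] <:+ (l ++ [r]) ↔ r = '.' := by
  rw [List.suffix_concat_iff]
  constructor
  · rintro (h | ⟨t, ht, -⟩)
    · simp at h
    · cases t with
      | nil => exact (List.singleton_inj.mp ht.symm)
      | cons a t => simp at ht
  · intro h; exact Or.inr ⟨[], by simp [h], List.nil_suffix⟩

theorem endswith_dot (s : String) :
    PySem.Str.endswith s "." = true ↔ s.toList.getLast? = some '.' := by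
  rw [PySem.Str.endswith_eq]
  have htl : ("." : String).toList = ['.'] := rfl
  rw [htl, PySem.Chars.endswith_iff]
  induction s.toList using List.reverseRecOn with
  | nil => simp
  | append_singleton l r _ => simp [singleton_suffix_concat]

-- A's whole computation equals a single filterMap after (conditionally) dropping a trailing '.'
theorem A_eq_core (cs : List Char) :
    ((PySem.List.enumerate cs.reverse 0).foldl
      (fun name ic =>
        if (ic.1 == 0 && ic.2 == '.') || ic.2 == ',' then name
        else if ic.2 == ' ' then name ++ ['-'] else name ++ [ic.2])
      ([] : List Char)).reverse
    = (if cs.getLast? = some '.' then cs.dropLast else cs).filterMap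
        (fun c => if c == ',' then none else some (if c == ' ' then '-' else c)) := by
  induction cs using List.reverseRecOn with
  | nil => simp [PySem.List.enumerate_nil]
  | append_singleton l r _ =>
    rw [List.reverse_append, List.reverse_singleton, List.singleton_append,
      PySem.List.enumerate_cons, List.foldl_cons, foldA_tail _ _ _ (by norm_num)]
    simp only [show ((0 : Int) == 0) = true from rfl, Bool.true_and,
      List.getLast?_concat, Option.some.injEq, List.dropLast_concat]
    by_cases h : r = '.'
    · simp [h, List.filterMap_reverse]
    · have hr : (r == '.') = false := by simp [h]
      rw [if_neg h]
      simp only [hr, Bool.false_or, List.filterMap_append, List.filterMap_cons,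
        List.filterMap_nil, List.filterMap_reverse]
      by_cases hc : r = ','
      · simp [hc]
      · have hc' : (r == ',') = false := by simp [hc]
        simp only [hc']
        by_cases hsp : r = ' ' <;> simp [hsp]

theorem name_clean_spec : Claim_equal_name_clean := by
  intro s _
  unfold Spec_name_clean name_clean name_clean_alt
  simp only []
  apply congrArg String.mk
  rw [A_eq_core s.toList, filter_map_eq_filterMap]
  by_cases h : s.toList.getLast? = some '.'
  · rw [if_pos h, if_pos ((endswith_dot s).2 h), PySem.Str.slice_to_neg_one]
  · rw [if_neg h, if_neg (by rw [endswith_dot]; exact h)]
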